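-- pv_equiv track=rewrite | github.com/IgrMd/yandex-algos-training | Тренировки по алгоритмам 1.0/Лекция 5. «Префиксные суммы и два указателя»/G.py | count_of_results
-- ===== SOURCE A (Python) =====
-- from collections import defaultdict
--
-- def count_of_results(n, k, cards: list[int]):
--     card_to_count = defaultdict(int)
--     for card in cards:
--         card_to_count[card] += 1
--     unique_cards = sorted(card_to_count.keys())
--     r = 0
--     count = 0
--     dups = 0
--     for l in range(len(unique_cards)):
--         while r < len(unique_cards) and unique_cards[r] <= unique_cards[l] * k:
--             if card_to_count[unique_cards[r]] >= 2:
--                 dups += 1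
--             r += 1
--         range_length = r - l
--         if card_to_count[unique_cards[l]] >= 2:
--             count += (range_length - 1) * 3
--         if card_to_count[unique_cards[l]] >= 3:
--             count += 1
--         count += (range_length - 1) * (range_length - 2) * 3
--         if card_to_count[unique_cards[l]] >= 2:
--             dups -= 1
--         count += dups * 3
--     return count
-- ===== SOURCE B (Python) =====
-- from bisect import bisect_right
--
-- def count_of_results(n, k, cards: list[int]):
--     cnt = {}
--     for card in cards:
--         cnt[card] = cnt.get(card, 0) + 1
--     u = sorted(cnt)
--     dv = [v for v in u if cnt[v] >= 2]
--     total = 0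
--     for l, v in enumerate(u):
--         hi = bisect_right(u, v * k)
--         m = hi - l
--         if cnt[v] >= 2:
--             total += (m - 1) * 3
--         if cnt[v] >= 3:
--             total += 1
--         total += (m - 1) * (m - 2) * 3
--         total += (bisect_right(dv, v * k) - bisect_right(dv, v)) * 3
--     return total
-- ===== Notes on version B (the rewrite author's own statement) =====
-- stated objective: alternative
-- what changed: A's stateful two-pointer window with an incrementally maintained 'dups' counter is replaced by a stateless per-value computation: for each distinct value the window end and the number of duplicated values inside the window are each found by an independent binary search (bisect_right on the distinct values and on the pre-filtered list of duplicated values).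
-- outside the precondition, e.g. on count_of_results(2, -2, [-1, 4]): A returns 6, B returns 18
import Mathlib
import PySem

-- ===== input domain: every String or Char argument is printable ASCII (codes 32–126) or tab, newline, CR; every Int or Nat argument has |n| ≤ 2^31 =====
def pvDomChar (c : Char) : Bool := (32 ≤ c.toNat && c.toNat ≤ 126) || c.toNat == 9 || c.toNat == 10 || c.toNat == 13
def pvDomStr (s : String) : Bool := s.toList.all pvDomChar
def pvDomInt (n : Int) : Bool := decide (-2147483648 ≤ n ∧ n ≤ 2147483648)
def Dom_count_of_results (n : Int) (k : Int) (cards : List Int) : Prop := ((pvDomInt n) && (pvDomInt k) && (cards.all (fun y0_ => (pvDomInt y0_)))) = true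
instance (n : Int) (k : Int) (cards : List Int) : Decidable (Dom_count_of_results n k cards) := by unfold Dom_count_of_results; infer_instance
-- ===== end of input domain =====

-- B replaces A's stateful two-pointer window and running 'dups' counter by two independent
-- binary searches per distinct value (window end, and duplicate values inside the window);
-- an alternative decomposition of the same asymptotic cost, proved equal for 0 ≤ k.

-- ===== PORT A =====
-- inner 'while r < len(unique_cards) and unique_cards[r] <= unique_cards[l] * k:' loop
def countOfResultsWhile (cnt : PySem.Dict Int Int) (u : List Int) (bound : Int)
    (r : Nat) (dups : Int) : Nat × Int :=
  if h : r < u.length then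
    if u[r] ≤ bound then
      countOfResultsWhile cnt u bound (r + 1)
        (if 2 ≤ cnt.getD u[r] 0 then dups + 1 else dups)
    else (r, dups)
  else (r, dups)
  termination_by u.length - r

-- outer 'for l in range(len(unique_cards)):' loop carrying (r, count, dups)
def countOfResultsLoop (cnt : PySem.Dict Int Int) (u : List Int) (k : Int)
    (l r : Nat) (count dups : Int) : Int :=
  if h : l < u.length then
    let rd := countOfResultsWhile cnt u (u[l] * k) r dups
    let rangeLength : Int := (rd.1 : Int) - (l : Int)
    let count1 := if 2 ≤ cnt.getD u[l] 0 then count + (rangeLength - 1) * 3 else count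
    let count2 := if 3 ≤ cnt.getD u[l] 0 then count1 + 1 else count1
    let count3 := count2 + (rangeLength - 1) * (rangeLength - 2) * 3
    let dups2 := if 2 ≤ cnt.getD u[l] 0 then rd.2 - 1 else rd.2
    countOfResultsLoop cnt u k (l + 1) rd.1 (count3 + dups2 * 3) dups2
  else count
  termination_by u.length - l

def count_of_results (n : Int) (k : Int) (cards : List Int) : Int :=
  let card_to_count := cards.foldl (fun d card => d.modify card 0 (· + 1)) PySem.Dict.empty
  let unique_cards := PySem.List.sorted card_to_count.keys (fun x => x)
  countOfResultsLoop card_to_count unique_cards k 0 0 0 0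

-- ===== PORT B =====
def count_of_results_alt (n : Int) (k : Int) (cards : List Int) : Int :=
  let cnt := cards.foldl (fun d card => d.insert card (d.getD card 0 + 1)) (PySem.Dict.empty : PySem.Dict Int Int)
  let u := PySem.List.sorted cnt.keys (fun x => x)
  let dv := u.filter (fun v => 2 ≤ cnt.getD v 0)
  (PySem.List.enumerate u).foldl (fun total lv =>
    let hi := PySem.List.bisectRight u (lv.2 * k)
    let m : Int := (hi : Int) - lv.1
    let t1 := if 2 ≤ cnt.getD lv.2 0 then total + (m - 1) * 3 else total
    let t2 := if 3 ≤ cnt.getD lv.2 0 then t1 + 1 else t1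
    let t3 := t2 + (m - 1) * (m - 2) * 3
    t3 + ((PySem.List.bisectRight dv (lv.2 * k) : Int) - (PySem.List.bisectRight dv lv.2 : Int)) * 3) 0

-- ===== PRECONDITION & SPEC =====
-- Pre_ restricts to the task's natural domain 0 ≤ k: for negative k the window bound
-- unique_cards[l]*k shrinks as l grows while A's pointer r never moves back, so A's
-- window sizes there are an accident of leftover pointer state that B does not reproduce.
def Pre_count_of_results (n : Int) (k : Int) (cards : List Int) : Prop := 0 ≤ k
instance (n : Int) (k : Int) (cards : List Int) : Decidable (Pre_count_of_results n k cards) := by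
  unfold Pre_count_of_results; infer_instance
def pvWitness_count_of_results : Int × Int × List Int := (4, 2, [1, 2, 2, 4])

def Spec_count_of_results (n : Int) (k : Int) (cards : List Int) (out : Int) : Prop := out = count_of_results_alt n k cards
instance (n : Int) (k : Int) (cards : List Int) (out : Int) : Decidable (Spec_count_of_results n k cards out) := by unfold Spec_count_of_results; infer_instance

-- ===== CLAIM (what is proved, stated in full; the proofs are below) =====
def Claim_equal_count_of_results : Prop := ∀ (n : Int) (k : Int) (cards : List Int), Dom_count_of_results n k cards → Pre_count_of_results n k cards → Spec_count_of_results n k cards (count_of_results n k cards)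

-- ===== LEMMAS AND PROOFS =====

-- number of duplicated values among the first i distinct values
def preCnt (cnt : PySem.Dict Int Int) (u : List Int) (i : Nat) : Int :=
  ((u.take i).countP (fun v => 2 ≤ cnt.getD v 0) : Int)

-- the per-value summand of B's fold
def bBody (cnt : PySem.Dict Int Int) (u dv : List Int) (k : Int) (lv : Int × Int) : Int :=
  (if 2 ≤ cnt.getD lv.2 0 then ((PySem.List.bisectRight u (lv.2 * k) : Int) - lv.1 - 1) * 3 else 0) +
  (if 3 ≤ cnt.getD lv.2 0 then 1 else 0) +
  ((PySem.List.bisectRight u (lv.2 * k) : Int) - lv.1 - 1) * ((PySem.List.bisectRight u (lv.2 * k) : Int) - lv.1 - 2) * 3 +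
  ((PySem.List.bisectRight dv (lv.2 * k) : Int) - (PySem.List.bisectRight dv lv.2 : Int)) * 3

lemma preCnt_succ (cnt : PySem.Dict Int Int) (u : List Int) (r : Nat) (h : r < u.length) :
    preCnt cnt u (r + 1) = preCnt cnt u r + (if 2 ≤ cnt.getD u[r] 0 then 1 else 0) := by
  have ht : u.take (r+1) = u.take r ++ [u[r]] := by
    rw [List.take_add_one, List.getElem?_eq_getElem h]; rfl
  unfold preCnt
  rw [ht, List.countP_append, List.countP_cons]
  push_cast
  split_ifs with h1 h2 <;> simp_all

-- A's while loop reaches exactly the bisect_right point and adds the duplicated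
-- values it passes over to dups
lemma countOfResultsWhile_eq (cnt : PySem.Dict Int Int) (u : List Int) (bound : Int)
    (hs : u.Pairwise (· ≤ ·)) :
    ∀ (m r : Nat) (dups : Int), u.length - r = m → r ≤ u.length →
    (∀ j (hj : j < u.length), j < r → u[j] ≤ bound) →
    countOfResultsWhile cnt u bound r dups =
      (PySem.List.bisectRight u bound,
       dups + (preCnt cnt u (PySem.List.bisectRight u bound) - preCnt cnt u r)) := by
  intro m
  induction m with
  | zero =>
    intro r dups hm hr hb
    have hr' : r = u.length := by omega
    rw [countOfResultsWhile, dif_neg (by omega)]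
    have hbis : PySem.List.bisectRight u bound = u.length := by
      obtain ⟨h1, h2, h3⟩ := PySem.List.bisectRight_spec u bound hs
      by_contra hne
      have hlt : PySem.List.bisectRight u bound < u.length := lt_of_le_of_ne h1 hne
      exact absurd (hb _ hlt (by omega)) (not_le.mpr (h3 _ hlt le_rfl))
    rw [hbis, hr']; simp
  | succ p ih =>
    intro r dups hm hr hb
    have hrl : r < u.length := by omega
    rw [countOfResultsWhile, dif_pos hrl]
    obtain ⟨h1, h2, h3⟩ := PySem.List.bisectRight_spec u bound hs
    by_cases hc : u[r] ≤ bound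
    · rw [if_pos hc]
      have hb' : ∀ j (hj : j < u.length), j < r+1 → u[j] ≤ bound := by
        intro j hj hjr
        rcases Nat.lt_succ_iff_lt_or_eq.mp hjr with h|h
        · exact hb j hj h
        · subst h; exact hc
      rw [ih (r+1) _ (by omega) (by omega) hb']
      rw [preCnt_succ cnt u r hrl]
      simp only [Prod.mk.injEq, true_and]
      split_ifs <;> ring
    · rw [if_neg hc]
      have hbis : PySem.List.bisectRight u bound = r := by
        have hle : PySem.List.bisectRight u bound ≤ r := by
          by_contra hgt; push_neg at hgt; exact absurd (h2 r hrl hgt) hc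
        have hge : r ≤ PySem.List.bisectRight u bound := by
          by_contra hlt2; push_neg at hlt2
          exact absurd (hb _ (by omega) hlt2) (not_le.mpr (h3 _ (by omega) le_rfl))
        omega
      rw [hbis]; simp

-- on a strictly increasing list, bisect_right of the l-th element is l+1
lemma bisectRight_getElem (u : List Int) (hs : u.Pairwise (· < ·)) (l : Nat) (hl : l < u.length) :
    PySem.List.bisectRight u u[l] = l + 1 := by
  obtain ⟨h1, h2, h3⟩ := PySem.List.bisectRight_spec u u[l] (hs.imp le_of_lt)
  have hmono := List.pairwise_iff_getElem.mp hs
  by_contra hne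
  rcases Nat.lt_or_ge (PySem.List.bisectRight u u[l]) (l+1) with hlt | hge
  · have := h3 l hl (by omega)
    omega
  · have hlt1 : l + 1 < PySem.List.bisectRight u u[l] := by omega
    have hl1 : l + 1 < u.length := by omega
    have := h2 (l+1) hl1 hlt1
    have := hmono l (l+1) (by omega) hl1 (by omega)
    omega

lemma countP_take_bisectRight (u : List Int) (hs : u.Pairwise (· ≤ ·)) (p : Int → Bool) (x : Int) :
    u.countP (fun w => p w && decide (w ≤ x)) =
      (u.take (PySem.List.bisectRight u x)).countP p := by
  obtain ⟨h1, h2, h3⟩ := PySem.List.bisectRight_spec u x hs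
  set nb := PySem.List.bisectRight u x with hnb
  calc u.countP (fun w => p w && decide (w ≤ x))
      = (u.take nb).countP (fun w => p w && decide (w ≤ x))
        + (u.drop nb).countP (fun w => p w && decide (w ≤ x)) := by
        rw [← List.countP_append, List.take_append_drop]
    _ = (u.take nb).countP p + 0 := by
        congr 1
        · apply List.countP_congr
          intro a ha
          obtain ⟨i, hi, rfl⟩ := List.mem_iff_getElem.mp ha
          have hilen : i < u.length := by
            have h' : (u.take nb).length = min nb u.length := List.length_take
            omega
          have : (u.take nb)[i] = u[i] := List.getElem_take
          rw [this]
          have hle : u[i] ≤ x := h2 i hilen (by simp at hi; omega)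
          simp [hle]
        · apply List.countP_eq_zero.mpr
          intro a ha
          obtain ⟨i, hi, hii⟩ := List.mem_iff_getElem.mp ha
          have hlen : nb + i < u.length := by
            have h' : (u.drop nb).length = u.length - nb := List.length_drop
            omega
          have hgd : (u.drop nb)[i] = u[nb + i] := List.getElem_drop ..
          have hxi : x < a := by rw [← hii, hgd]; exact h3 (nb + i) hlen (by omega)
          simp [not_le.mpr hxi]
    _ = (u.take nb).countP p := by omega

lemma bisectRight_eq_countP (u : List Int) (hs : u.Pairwise (· ≤ ·)) (x : Int) :
    PySem.List.bisectRight u x = u.countP (fun w => decide (w ≤ x)) := by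
  obtain ⟨h1, h2, h3⟩ := PySem.List.bisectRight_spec u x hs
  have := countP_take_bisectRight u hs (fun _ => true) x
  simp [List.countP_true] at this
  omega

-- B's bisect on the duplicated-values list counts duplicated values below the cut
lemma bisectRight_filter_eq_preCnt (cnt : PySem.Dict Int Int) (u : List Int)
    (hs : u.Pairwise (· < ·)) (y : Int) :
    (PySem.List.bisectRight (u.filter (fun v => 2 ≤ cnt.getD v 0)) y : Int) =
      preCnt cnt u (PySem.List.bisectRight u y) := by
  have hsle : u.Pairwise (· ≤ ·) := hs.imp le_of_lt
  have hdv : (u.filter (fun v => 2 ≤ cnt.getD v 0)).Pairwise ((· ≤ ·) : Int → Int → Prop) :=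
    List.Pairwise.filter _ hsle
  rw [bisectRight_eq_countP _ hdv y, List.countP_filter]
  rw [show (fun (w : Int) => decide (w ≤ y) && decide (2 ≤ cnt.getD w 0)) =
        (fun (w : Int) => decide (2 ≤ cnt.getD w 0) && decide (w ≤ y)) from
        funext (fun w => Bool.and_comm _ _)]
  rw [countP_take_bisectRight u hsle _ y]
  rfl

-- the main invariant: A's loop from state (l, r, count, dups) produces count plus
-- B's per-value sums over the remaining distinct values
lemma countOfResultsLoop_eq (cnt : PySem.Dict Int Int) (u : List Int) (k : Int)
    (hk : 0 ≤ k) (hs : u.Pairwise (· < ·)) :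
    ∀ (m l r : Nat) (count dups : Int), u.length - l = m → l ≤ u.length → r ≤ u.length →
    (∀ j (hj : j < u.length), j < r → ∀ (hl : l < u.length), u[j] ≤ u[l] * k) →
    dups = preCnt cnt u r - preCnt cnt u l →
    countOfResultsLoop cnt u k l r count dups =
      count + ((PySem.List.enumerate (u.drop l) (l : Int)).map
                 (bBody cnt u (u.filter (fun v => 2 ≤ cnt.getD v 0)) k)).sum := by
  have hsle : u.Pairwise (· ≤ ·) := hs.imp le_of_lt
  have hmono := List.pairwise_iff_getElem.mp hs
  intro m
  induction m with
  | zero =>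
    intro l r count dups hm hl hr hb hd
    have hl' : l = u.length := by omega
    rw [countOfResultsLoop, dif_neg (by omega)]
    rw [hl', List.drop_length]
    simp [PySem.List.enumerate]
  | succ p ih =>
    intro l r count dups hm hl hr hb hd
    have hll : l < u.length := by omega
    rw [countOfResultsLoop, dif_pos hll]
    have hwh := countOfResultsWhile_eq cnt u (u[l] * k) hsle (u.length - r) r dups rfl hr
      (fun j hj hjr => hb j hj hjr hll)
    simp only [hwh]
    obtain ⟨h1, h2, h3⟩ := PySem.List.bisectRight_spec u (u[l] * k) hsle
    set hi := PySem.List.bisectRight u (u[l] * k) with hhi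
    have hb' : ∀ j (hj : j < u.length), j < hi → ∀ (hl1 : l + 1 < u.length), u[j] ≤ u[l+1] * k := by
      intro j hj hjhi hl1
      have hj1 : u[j] ≤ u[l] * k := h2 j hj hjhi
      have hll1 : u[l] ≤ u[l+1] := le_of_lt (hmono l (l+1) (by omega) hl1 (by omega))
      calc u[j] ≤ u[l] * k := hj1
        _ ≤ u[l+1] * k := mul_le_mul_of_nonneg_right hll1 hk
    have hpre1 : preCnt cnt u (l+1) = preCnt cnt u l + (if 2 ≤ cnt.getD u[l] 0 then 1 else 0) :=
      preCnt_succ cnt u l hll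
    have hdd : (if 2 ≤ cnt.getD u[l] 0 then dups + (preCnt cnt u hi - preCnt cnt u r) - 1
                 else dups + (preCnt cnt u hi - preCnt cnt u r))
               = preCnt cnt u hi - preCnt cnt u (l+1) := by
      rw [hpre1]; split_ifs <;> omega
    rw [hdd]
    rw [ih (l+1) hi _ _ (by omega) (by omega) h1 hb' rfl]
    rw [List.drop_eq_getElem_cons hll, PySem.List.enumerate_cons, List.map_cons, List.sum_cons]
    have hfil := bisectRight_filter_eq_preCnt cnt u hs
    have hself : PySem.List.bisectRight u u[l] = l + 1 := bisectRight_getElem u hs l hll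
    rw [bBody]
    simp only [hfil, hself, hhi]
    push_cast [hpre1]
    split_ifs <;> ring

lemma foldl_body_eq (C : PySem.Dict Int Int) (U DV : List Int) (k : Int) :
    (fun (total : Int) (lv : Int × Int) =>
      (if 3 ≤ C.getD lv.2 0 then
          (if 2 ≤ C.getD lv.2 0 then total + ((PySem.List.bisectRight U (lv.2 * k) : Int) - lv.1 - 1) * 3 else total) + 1
        else if 2 ≤ C.getD lv.2 0 then total + ((PySem.List.bisectRight U (lv.2 * k) : Int) - lv.1 - 1) * 3 else total)
      + ((PySem.List.bisectRight U (lv.2 * k) : Int) - lv.1 - 1) * ((PySem.List.bisectRight U (lv.2 * k) : Int) - lv.1 - 2) * 3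
      + ((PySem.List.bisectRight DV (lv.2 * k) : Int) - (PySem.List.bisectRight DV lv.2 : Int)) * 3)
    = fun total lv => total + bBody C U DV k lv := by
  funext t lv
  simp only [bBody]
  split_ifs <;> ring

-- ===== VERDICT (by name: the statement is the Claim_ definition above) =====
theorem count_of_results_spec : Claim_equal_count_of_results := by
  intro n k cards _ hpre
  unfold Pre_count_of_results at hpre
  unfold Spec_count_of_results count_of_results count_of_results_alt
  dsimp only
  simp only [PySem.Dict.foldl_insert_getD_add_one_eq_counter, ← PySem.Dict.counter_eq_foldl]
  rw [foldl_body_eq, PySem.List.foldl_add]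
  have hs : (PySem.List.sorted (PySem.Dict.counter cards).keys (fun x => x)).Pairwise
      ((· < ·) : Int → Int → Prop) := by
    rw [PySem.Dict.keys_counter]
    exact PySem.List.sorted_ofList_pairwise_lt cards
  have := countOfResultsLoop_eq (PySem.Dict.counter cards)
      (PySem.List.sorted (PySem.Dict.counter cards).keys (fun x => x)) k hpre hs
      (PySem.List.sorted (PySem.Dict.counter cards).keys (fun x => x)).length 0 0 0 0
      (by omega) (by omega) (by omega) (by intro j hj h; omega) (by simp [preCnt])
  simpa using this
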